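-- pv_equiv track=rewrite | github.com/Clamepending/remote-vibes | experiments/arc-swarm/runs/hybrid/solver.py | _fill_rectangles_with_color
-- ===== SOURCE A (Python) =====
-- Grid = list[list[int]]
--
-- def _fill_rectangles_with_color(g: Grid, frame: int, fill: int) -> Grid:
--     """Find axis-aligned rectangular frames of colour `frame` (hollow) and
--     fill their strict interior zero cells with `fill`."""
--     h = len(g)
--     w = len(g[0])
--     out = [row[:] for row in g]
--     # Find every closed hollow rectangle of `frame` cells. Approach: for
--     # each pair (r1,c1), find the largest rectangle whose perimeter is all
--     # `frame` and whose interior is all 0.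
--     for r1 in range(h):
--         for c1 in range(w):
--             if g[r1][c1] != frame:
--                 continue
--             for r2 in range(r1 + 2, h):
--                 for c2 in range(c1 + 2, w):
--                     # Check perimeter
--                     ok = True
--                     for c in range(c1, c2 + 1):
--                         if g[r1][c] != frame or g[r2][c] != frame:
--                             ok = False
--                             break
--                     if not ok:
--                         continue
--                     for r in range(r1, r2 + 1):
--                         if g[r][c1] != frame or g[r][c2] != frame:
--                             ok = False
--                             break
--                     if not ok:
--                         continue
--                     # Check interior is zero
--                     interior_ok = True
--                     for r in range(r1 + 1, r2):
--                         for c in range(c1 + 1, c2):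
--                             if g[r][c] != 0:
--                                 interior_ok = False
--                                 break
--                         if not interior_ok:
--                             break
--                     if not interior_ok:
--                         continue
--                     # Fill interior
--                     for r in range(r1 + 1, r2):
--                         for c in range(c1 + 1, c2):
--                             out[r][c] = fill
--     return out
-- ===== SOURCE B (Python) =====
-- Grid = list[list[int]]
--
-- def _prefix_ne(row, v, w):
--     """pref[j] = number of cells in row[:j] that differ from v, for j in 0..w."""
--     pref = [0]
--     s = 0
--     for x in row[:w]:
--         s += (x != v)
--         pref.append(s)
--     return pref
--
-- def _col_accum(rows, w):
--     """res[i][j] = sum over the first i rows of rows[r][j] (each row length w+1)."""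
--     res = [[0] * (w + 1)]
--     cur = [0] * (w + 1)
--     for row in rows:
--         cur = [cur[j] + row[j] for j in range(w + 1)]
--         res.append(cur)
--     return res
--
-- def _fill_rectangles_with_color(g: Grid, frame: int, fill: int) -> Grid:
--     """Find axis-aligned rectangular frames of colour `frame` (hollow) and
--     fill their strict interior zero cells with `fill`.
--
--     Alternative algorithm: 2D prefix-sum tables of non-frame counts (and of
--     non-zero counts) replace A's per-rectangle perimeter and interior
--     re-scans by constant-count prefix-difference lookups."""
--     h = len(g)
--     w = len(g[0])
--     NF = _col_accum([_prefix_ne(row, frame, w) for row in g], w)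
--     NZ = _col_accum([_prefix_ne(row, 0, w) for row in g], w)
--
--     def rect(P, r1, c1, r2, c2):
--         # count over the inclusive cell rectangle [r1..r2] x [c1..c2]
--         return P[r2 + 1][c2 + 1] - P[r1][c2 + 1] - P[r2 + 1][c1] + P[r1][c1]
--
--     out = [row[:] for row in g]
--     for r1 in range(h):
--         for c1 in range(w):
--             if g[r1][c1] != frame:
--                 continue
--             for r2 in range(r1 + 2, h):
--                 for c2 in range(c1 + 2, w):
--                     if (rect(NF, r1, c1, r1, c2) == 0
--                             and rect(NF, r2, c1, r2, c2) == 0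
--                             and rect(NF, r1, c1, r2, c1) == 0
--                             and rect(NF, r1, c2, r2, c2) == 0
--                             and rect(NZ, r1 + 1, c1 + 1, r2 - 1, c2 - 1) == 0):
--                         for r in range(r1 + 1, r2):
--                             for c in range(c1 + 1, c2):
--                                 out[r][c] = fill
--     return out
-- ===== Notes on version B (the rewrite author's own statement) =====
-- stated objective: alternative
-- what changed: B precomputes 2D prefix-sum tables of non-frame and non-zero cell counts and tests each candidate rectangle's four perimeter sides and interior by prefix-difference lookups instead of A's per-rectangle perimeter and interior re-scans; it trades A's rescanning for an O(h w) table build, which does not pay off on sparse random grids.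
import Mathlib
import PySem

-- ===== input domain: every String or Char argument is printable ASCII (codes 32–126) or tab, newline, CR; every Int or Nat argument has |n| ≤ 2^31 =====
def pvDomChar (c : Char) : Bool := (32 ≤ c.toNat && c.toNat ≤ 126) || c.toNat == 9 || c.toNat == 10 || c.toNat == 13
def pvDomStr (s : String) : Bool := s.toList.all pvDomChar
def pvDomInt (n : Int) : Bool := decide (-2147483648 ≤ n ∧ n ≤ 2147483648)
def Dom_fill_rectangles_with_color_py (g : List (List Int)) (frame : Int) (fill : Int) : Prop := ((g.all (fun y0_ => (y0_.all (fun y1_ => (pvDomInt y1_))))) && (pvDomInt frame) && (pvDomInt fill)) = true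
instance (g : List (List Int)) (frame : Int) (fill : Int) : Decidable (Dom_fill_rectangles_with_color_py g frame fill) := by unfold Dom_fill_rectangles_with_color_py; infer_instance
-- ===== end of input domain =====

-- B replaces A's per-rectangle perimeter/interior re-scans by 2D prefix-sum
-- tables queried by prefix-difference lookups (objective: alternative algorithm;
-- the fill writes themselves are unchanged).

-- ===== PORT A =====
-- g[r][c] (indices always in range under Pre_)
def pvGetA (g : List (List Int)) (r c : Int) : Int :=
  PySem.List.pyGetD (PySem.List.pyGetD g r []) c 0

-- out[r][c] = v
def pvSetA (m : List (List Int)) (r c v : Int) : List (List Int) :=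
  PySem.List.pySetD m r (PySem.List.pySetD (PySem.List.pyGetD m r []) c v)

-- the two nested fill loops of A
def pvFillA (out : List (List Int)) (r1 c1 r2 c2 v : Int) : List (List Int) :=
  (PySem.List.pyRange (r1+1) r2).foldl (fun o r =>
    (PySem.List.pyRange (c1+1) c2).foldl (fun o2 c => pvSetA o2 r c v) o) out

def fill_rectangles_with_color_py (g : List (List Int)) (frame : Int) (fill : Int) : List (List Int) :=
  let h : Int := g.length
  let w : Int := (PySem.List.pyGetD g 0 []).length
  let out := g.map (fun row => row)
  (PySem.List.pyRange 0 h).foldl (fun out r1 =>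
    (PySem.List.pyRange 0 w).foldl (fun out c1 =>
      if pvGetA g r1 c1 ≠ frame then out else
      (PySem.List.pyRange (r1+2) h).foldl (fun out r2 =>
        (PySem.List.pyRange (c1+2) w).foldl (fun out c2 =>
          -- perimeter scans (early break returns the same Bool as the full all)
          if ((PySem.List.pyRange c1 (c2+1)).all fun c => pvGetA g r1 c == frame && pvGetA g r2 c == frame)
             && ((PySem.List.pyRange r1 (r2+1)).all fun r => pvGetA g r c1 == frame && pvGetA g r c2 == frame)
             && ((PySem.List.pyRange (r1+1) r2).all fun r =>
                   (PySem.List.pyRange (c1+1) c2).all fun c => pvGetA g r c == 0)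
          then pvFillA out r1 c1 r2 c2 fill else out) out) out) out) out

-- ===== PORT B =====
def pvGetB (g : List (List Int)) (r c : Int) : Int :=
  PySem.List.pyGetD (PySem.List.pyGetD g r []) c 0

def pvSetB (m : List (List Int)) (r c v : Int) : List (List Int) :=
  PySem.List.pySetD m r (PySem.List.pySetD (PySem.List.pyGetD m r []) c v)

def pvFillB (out : List (List Int)) (r1 c1 r2 c2 v : Int) : List (List Int) :=
  (PySem.List.pyRange (r1+1) r2).foldl (fun o r =>
    (PySem.List.pyRange (c1+1) c2).foldl (fun o2 c => pvSetB o2 r c v) o) out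

-- pref[j] = # of cells in row[:w][:j] that differ from v
def prefixNe (row : List Int) (v w : Int) : List Int :=
  ((PySem.List.slice row none (some w)).foldl
    (fun (a : List Int × Int) x =>
      (a.1 ++ [a.2 + (if x ≠ v then 1 else 0)], a.2 + (if x ≠ v then 1 else 0))) ([0], 0)).1

-- res[i][j] = sum over the first i rows of rows[r][j]
def colAccum (rows : List (List Int)) (w : Int) : List (List Int) :=
  ((rows.foldl
    (fun (a : List (List Int) × List Int) row =>
      ((a.1 ++ [(PySem.List.pyRange 0 (w+1)).map
          (fun j => PySem.List.pyGetD a.2 j 0 + PySem.List.pyGetD row j 0)]),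
        (PySem.List.pyRange 0 (w+1)).map
          (fun j => PySem.List.pyGetD a.2 j 0 + PySem.List.pyGetD row j 0)))
    ([List.replicate (w+1).toNat 0], List.replicate (w+1).toNat 0)).1)

-- count over the inclusive cell rectangle [r1..r2] × [c1..c2] from a prefix table
def pvRect (P : List (List Int)) (r1 c1 r2 c2 : Int) : Int :=
  PySem.List.pyGetD (PySem.List.pyGetD P (r2+1) []) (c2+1) 0
  - PySem.List.pyGetD (PySem.List.pyGetD P r1 []) (c2+1) 0
  - PySem.List.pyGetD (PySem.List.pyGetD P (r2+1) []) c1 0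
  + PySem.List.pyGetD (PySem.List.pyGetD P r1 []) c1 0

def fill_rectangles_with_color_py_alt (g : List (List Int)) (frame : Int) (fill : Int) : List (List Int) :=
  let h : Int := g.length
  let w : Int := (PySem.List.pyGetD g 0 []).length
  let NF := colAccum (g.map fun row => prefixNe row frame w) w
  let NZ := colAccum (g.map fun row => prefixNe row 0 w) w
  let out := g.map (fun row => row)
  (PySem.List.pyRange 0 h).foldl (fun out r1 =>
    (PySem.List.pyRange 0 w).foldl (fun out c1 =>
      if pvGetB g r1 c1 ≠ frame then out else
      (PySem.List.pyRange (r1+2) h).foldl (fun out r2 =>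
        (PySem.List.pyRange (c1+2) w).foldl (fun out c2 =>
          if pvRect NF r1 c1 r1 c2 == 0 && pvRect NF r2 c1 r2 c2 == 0
             && pvRect NF r1 c1 r2 c1 == 0 && pvRect NF r1 c2 r2 c2 == 0
             && pvRect NZ (r1+1) (c1+1) (r2-1) (c2-1) == 0
          then pvFillB out r1 c1 r2 c2 fill else out) out) out) out) out

-- ===== PRECONDITION & SPEC =====
-- Pre_ excludes exactly the inputs on which A raises an IndexError: the empty
-- grid (len(g[0])) and grids with a row shorter than the first row (g[r][c]).
def Pre_fill_rectangles_with_color_py (g : List (List Int)) (frame : Int) (fill : Int) : Prop :=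
  g ≠ [] ∧ ∀ row ∈ g, (PySem.List.pyGetD g 0 []).length ≤ row.length
instance (g : List (List Int)) (frame : Int) (fill : Int) : Decidable (Pre_fill_rectangles_with_color_py g frame fill) := by
  unfold Pre_fill_rectangles_with_color_py; infer_instance

def pvWitness_fill_rectangles_with_color_py : List (List Int) × Int × Int :=
  ([[1,1,1],[1,0,1],[1,1,1]], 1, 2)

def Spec_fill_rectangles_with_color_py (g : List (List Int)) (frame : Int) (fill : Int) (out : List (List Int)) : Prop := out = fill_rectangles_with_color_py_alt g frame fill
instance (g : List (List Int)) (frame : Int) (fill : Int) (out : List (List Int)) : Decidable (Spec_fill_rectangles_with_color_py g frame fill out) := by unfold Spec_fill_rectangles_with_color_py; infer_instance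

-- ===== CLAIM (what is proved, stated in full; the proofs are below) =====
def Claim_equal_fill_rectangles_with_color_py : Prop := ∀ (g : List (List Int)) (frame : Int) (fill : Int), Dom_fill_rectangles_with_color_py g frame fill → Pre_fill_rectangles_with_color_py g frame fill → Spec_fill_rectangles_with_color_py g frame fill (fill_rectangles_with_color_py g frame fill)


-- ===== LEMMAS AND PROOFS =====

-- the running state of the two accumulate-and-append loops in B
def pvScan {A T : Type} (nxt : T -> A -> T) : List A -> T -> List T
  | [], _ => []
  | x :: xs, s => nxt s x :: pvScan nxt xs (nxt s x)

theorem foldl_scan {A T : Type} (nxt : T -> A -> T) (xs : List A) (p : List T) (s : T) :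
    xs.foldl (fun (a : List T × T) x => (a.1 ++ [nxt a.2 x], nxt a.2 x)) (p, s)
      = (p ++ pvScan nxt xs s, xs.foldl nxt s) := by
  induction xs generalizing p s with
  | nil => simp [pvScan]
  | cons x xs ih => simp [pvScan, ih]

theorem pvScan_getD {A T : Type} (nxt : T -> A -> T) (xs : List A) (s : T) (d : T)
    (j : Nat) (hj : j < xs.length) :
    (pvScan nxt xs s).getD j d = (xs.take (j+1)).foldl nxt s := by
  induction xs generalizing s j with
  | nil => simp at hj
  | cons x xs ih =>
    cases j with
    | zero => simp [pvScan]
    | succ j => simpa [pvScan] using ih (nxt s x) j (by simpa using hj)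

theorem sum_map_take (xs : List Int) (f : Int -> Int) (n : Nat) (hn : n ≤ xs.length) :
    ((xs.take n).map f).sum = ∑ c ∈ Finset.range n, f (xs.getD c 0) := by
  induction n with
  | zero => simp
  | succ n ih =>
    have hn' : n < xs.length := by omega
    rw [List.map_take, List.take_succ]
    have h4 : (List.map f xs)[n]? = some (f xs[n]) := by
      rw [List.getElem?_map, List.getElem?_eq_getElem hn']; rfl
    rw [h4]
    simp only [Option.toList_some, List.sum_append, List.sum_cons, List.sum_nil]
    rw [← List.map_take, ih (by omega), Finset.sum_range_succ]
    simp [List.getElem?_eq_getElem hn']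

theorem prefixNe_getD (row : List Int) (v w : Int) (hw : 0 ≤ w)
    (hlen : w.toNat ≤ row.length) (j : Nat) (hj : j ≤ w.toNat) :
    (prefixNe row v w).getD j 0
      = ∑ c ∈ Finset.range j, (if row.getD c 0 ≠ v then (1:Int) else 0) := by
  unfold prefixNe
  rw [PySem.List.slice_to row hw]
  rw [foldl_scan (fun (s x : Int) => s + (if x ≠ v then 1 else 0)) (row.take w.toNat) [0] 0]
  cases j with
  | zero => simp
  | succ j =>
    have hj' : j < (row.take w.toNat).length := by
      simp [List.length_take]; omega
    have h1 : ([(0:Int)] ++ pvScan (fun (s x : Int) => s + (if x ≠ v then 1 else 0)) (row.take w.toNat) 0).getD (j+1) 0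
        = (pvScan (fun (s x : Int) => s + (if x ≠ v then 1 else 0)) (row.take w.toNat) 0).getD j 0 := by
      simp
    rw [h1, pvScan_getD _ _ _ _ j hj']
    rw [List.take_take]
    have h2 : min (j+1) w.toNat = j + 1 := by omega
    rw [h2]
    rw [PySem.List.foldl_add]
    rw [sum_map_take row _ (j+1) (by omega)]
    simp

-- entries of the running column accumulator after i rows
theorem colAccum_fold_entry (rows : List (List Int)) (w : Int) (hw : 0 ≤ w)
    (i : Nat) (hi : i ≤ rows.length) (j : Int) (hj0 : 0 ≤ j) (hj : j ≤ w) :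
    PySem.List.pyGetD
      ((rows.take i).foldl
        (fun cur row => (PySem.List.pyRange 0 (w+1)).map
          (fun t => PySem.List.pyGetD cur t 0 + PySem.List.pyGetD row t 0))
        (List.replicate (w+1).toNat 0)) j 0
      = ∑ r ∈ Finset.range i, PySem.List.pyGetD (rows.getD r []) j 0 := by
  induction i with
  | zero =>
    rw [PySem.List.pyGetD_of_nonneg _ _ hj0]
    have : j.toNat < (w+1).toNat := by omega
    simp [List.getD_replicate _ this]
  | succ i ih =>
    have hi' : i < rows.length := by omega
    rw [List.take_succ, List.getElem?_eq_getElem hi', Option.toList_some, List.foldl_append]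
    simp only [List.foldl_cons, List.foldl_nil]
    rw [PySem.List.pyGetD_map_pyRange_of_nonneg _ (w+1) j 0 hj0 (by omega)]
    rw [ih (by omega)]
    rw [Finset.sum_range_succ, List.getD_eq_getElem rows [] hi']

theorem colAccum_entry (rows : List (List Int)) (w : Int) (hw : 0 ≤ w)
    (i : Nat) (hi : i ≤ rows.length) (j : Int) (hj0 : 0 ≤ j) (hj : j ≤ w) :
    PySem.List.pyGetD (PySem.List.pyGetD (colAccum rows w) (i : Int) []) j 0
      = ∑ r ∈ Finset.range i, PySem.List.pyGetD (rows.getD r []) j 0 := by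
  unfold colAccum
  rw [foldl_scan (fun cur row => (PySem.List.pyRange 0 (w+1)).map
        (fun t => PySem.List.pyGetD cur t 0 + PySem.List.pyGetD row t 0))
      rows [List.replicate (w+1).toNat 0] (List.replicate (w+1).toNat 0)]
  rw [PySem.List.pyGetD_natCast]
  cases i with
  | zero =>
    rw [PySem.List.pyGetD_of_nonneg _ _ hj0]
    have : j.toNat < (w+1).toNat := by omega
    simp [List.getD_replicate _ this]
  | succ i =>
    have h1 : (([List.replicate (w+1).toNat (0:Int)] ++ pvScan (fun cur row => (PySem.List.pyRange 0 (w+1)).map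
          (fun t => PySem.List.pyGetD cur t 0 + PySem.List.pyGetD row t 0)) rows (List.replicate (w+1).toNat 0)).getD (i+1) []) = (pvScan (fun cur row => (PySem.List.pyRange 0 (w+1)).map
          (fun t => PySem.List.pyGetD cur t 0 + PySem.List.pyGetD row t 0)) rows (List.replicate (w+1).toNat 0)).getD i [] := by
      simp
    rw [h1, pvScan_getD _ _ _ _ i (by omega)]
    exact colAccum_fold_entry rows w hw (i+1) hi j hj0 hj

-- entries of the 2D prefix table built by B, as a double count over the grid
theorem table_entry (g : List (List Int)) (v : Int)
    (hPre : ∀ row ∈ g, (PySem.List.pyGetD g 0 []).length ≤ row.length)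
    (i j : Int) (h0i : 0 ≤ i) (hi : i ≤ g.length)
    (h0j : 0 ≤ j) (hj : j ≤ ((PySem.List.pyGetD g 0 []).length : Int)) :
    PySem.List.pyGetD (PySem.List.pyGetD
        (colAccum (g.map fun row => prefixNe row v ((PySem.List.pyGetD g 0 []).length : Int))
          ((PySem.List.pyGetD g 0 []).length : Int)) i []) j 0
      = ∑ r ∈ Finset.range i.toNat, ∑ c ∈ Finset.range j.toNat,
          (if (g.getD r []).getD c 0 ≠ v then (1:Int) else 0) := by
  set w : Int := ((PySem.List.pyGetD g 0 []).length : Int) with hwdef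
  have hw : 0 ≤ w := by positivity
  have hcast : i = ((i.toNat : Nat) : Int) := by omega
  rw [hcast]
  rw [colAccum_entry _ w hw i.toNat (by simpa using (by omega : i.toNat ≤ g.length)) j h0j hj]
  apply Finset.sum_congr rfl
  intro r hr
  have hr' : r < g.length := by
    have := Finset.mem_range.1 hr; omega
  have h2 : (g.map fun row => prefixNe row v w).getD r [] = prefixNe (g.getD r []) v w := by
    rw [List.getD_eq_getElem _ [] (by simpa using hr'), List.getElem_map,
        List.getD_eq_getElem g [] hr']
  rw [h2, PySem.List.pyGetD_of_nonneg _ _ h0j]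
  rw [prefixNe_getD (g.getD r []) v w hw ?hlen j.toNat (by omega)]
  case hlen =>
    have hmem : g.getD r [] ∈ g := by
      rw [List.getD_eq_getElem g [] hr']; exact List.getElem_mem hr'
    have := hPre _ hmem
    omega

-- a prefix-difference rectangle count is zero iff every cell of the rectangle equals v
theorem rect_zero_iff (g : List (List Int)) (v : Int)
    (hPre : ∀ row ∈ g, (PySem.List.pyGetD g 0 []).length ≤ row.length)
    (r1 c1 r2 c2 : Int)
    (h0r : 0 ≤ r1) (hr12 : r1 ≤ r2) (hr2 : r2 < g.length)
    (h0c : 0 ≤ c1) (hc12 : c1 ≤ c2) (hc2 : c2 < ((PySem.List.pyGetD g 0 []).length : Int)) :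
    (pvRect (colAccum (g.map fun row => prefixNe row v ((PySem.List.pyGetD g 0 []).length : Int))
        ((PySem.List.pyGetD g 0 []).length : Int)) r1 c1 r2 c2 = 0)
      ↔ ∀ r c : Int, r1 ≤ r → r ≤ r2 → c1 ≤ c → c ≤ c2 →
          PySem.List.pyGetD (PySem.List.pyGetD g r []) c 0 = v := by
  unfold pvRect
  rw [table_entry g v hPre (r2+1) (c2+1) (by omega) (by omega) (by omega) (by omega)]
  rw [table_entry g v hPre r1 (c2+1) (by omega) (by omega) (by omega) (by omega)]
  rw [table_entry g v hPre (r2+1) c1 (by omega) (by omega) (by omega) (by omega)]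
  rw [table_entry g v hPre r1 c1 (by omega) (by omega) (by omega) (by omega)]
  have e1 : (r2+1).toNat = r2.toNat + 1 := by omega
  have e2 : (c2+1).toNat = c2.toNat + 1 := by omega
  rw [e1, e2]
  set ind : Nat → Nat → Int := fun r c => (if (g.getD r []).getD c 0 ≠ v then (1:Int) else 0) with hind
  have hsplit : ∀ (jn : Nat),
      (∑ r ∈ Finset.range (r2.toNat+1), ∑ c ∈ Finset.range jn, ind r c)
        - ∑ r ∈ Finset.range r1.toNat, ∑ c ∈ Finset.range jn, ind r c
      = ∑ r ∈ Finset.Ico r1.toNat (r2.toNat+1), ∑ c ∈ Finset.range jn, ind r c := by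
    intro jn
    rw [Finset.sum_Ico_eq_sub _ (by omega)]
  have halg :
      (∑ r ∈ Finset.range (r2.toNat+1), ∑ c ∈ Finset.range (c2.toNat+1), ind r c)
        - (∑ r ∈ Finset.range r1.toNat, ∑ c ∈ Finset.range (c2.toNat+1), ind r c)
        - (∑ r ∈ Finset.range (r2.toNat+1), ∑ c ∈ Finset.range c1.toNat, ind r c)
        + (∑ r ∈ Finset.range r1.toNat, ∑ c ∈ Finset.range c1.toNat, ind r c)
      = ∑ r ∈ Finset.Ico r1.toNat (r2.toNat+1), ∑ c ∈ Finset.Ico c1.toNat (c2.toNat+1), ind r c := by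
    have h3 :
        (∑ r ∈ Finset.range (r2.toNat+1), ∑ c ∈ Finset.range (c2.toNat+1), ind r c)
          - (∑ r ∈ Finset.range r1.toNat, ∑ c ∈ Finset.range (c2.toNat+1), ind r c)
          - ((∑ r ∈ Finset.range (r2.toNat+1), ∑ c ∈ Finset.range c1.toNat, ind r c)
          - (∑ r ∈ Finset.range r1.toNat, ∑ c ∈ Finset.range c1.toNat, ind r c))
        = ∑ r ∈ Finset.Ico r1.toNat (r2.toNat+1),
            ((∑ c ∈ Finset.range (c2.toNat+1), ind r c) - ∑ c ∈ Finset.range c1.toNat, ind r c) := by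
      rw [hsplit, hsplit, ← Finset.sum_sub_distrib]
    calc _ = (∑ r ∈ Finset.range (r2.toNat+1), ∑ c ∈ Finset.range (c2.toNat+1), ind r c)
          - (∑ r ∈ Finset.range r1.toNat, ∑ c ∈ Finset.range (c2.toNat+1), ind r c)
          - ((∑ r ∈ Finset.range (r2.toNat+1), ∑ c ∈ Finset.range c1.toNat, ind r c)
          - (∑ r ∈ Finset.range r1.toNat, ∑ c ∈ Finset.range c1.toNat, ind r c)) := by ring
      _ = _ := by
          rw [h3]
          apply Finset.sum_congr rfl
          intro r _
          rw [Finset.sum_Ico_eq_sub _ (by omega)]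
  rw [halg]
  rw [Finset.sum_eq_zero_iff_of_nonneg (by
    intro r _
    apply Finset.sum_nonneg
    intro c _
    simp only [hind]
    split <;> norm_num)]
  constructor
  · intro hz r c hra hrb hca hcb
    have hr' := hz r.toNat (by rw [Finset.mem_Ico]; omega)
    rw [Finset.sum_eq_zero_iff_of_nonneg (by intro c _; simp only [hind]; split <;> norm_num)] at hr'
    have hc' := hr' c.toNat (by rw [Finset.mem_Ico]; omega)
    simp only [hind, ite_eq_right_iff] at hc'
    rw [PySem.List.pyGetD_of_nonneg _ _ (by omega : (0:Int) ≤ r),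
        PySem.List.pyGetD_of_nonneg _ _ (by omega : (0:Int) ≤ c)]
    by_contra hne
    exact one_ne_zero (hc' hne)
  · intro hall r hr
    rw [Finset.mem_Ico] at hr
    rw [Finset.sum_eq_zero_iff_of_nonneg (by intro c _; simp only [hind]; split <;> norm_num)]
    intro c hc
    rw [Finset.mem_Ico] at hc
    have hv := hall (r : Int) (c : Int) (by omega) (by omega) (by omega) (by omega)
    rw [PySem.List.pyGetD_of_nonneg _ _ (by positivity),
        PySem.List.pyGetD_of_nonneg _ _ (by positivity)] at hv
    rw [Int.toNat_natCast, Int.toNat_natCast] at hv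
    simp only [hind, ite_eq_right_iff]
    intro hne
    exact absurd hv hne

theorem pvGetB_eq (g : List (List Int)) (r c : Int) : pvGetB g r c = pvGetA g r c := rfl

theorem pvFill_eq (o : List (List Int)) (r1 c1 r2 c2 v : Int) :
    pvFillA o r1 c1 r2 c2 v = pvFillB o r1 c1 r2 c2 v := rfl

-- A's three perimeter/interior scans decide the same Bool as B's five prefix-difference checks
theorem cond_eq (g : List (List Int)) (frame : Int)
    (hPre : ∀ row ∈ g, (PySem.List.pyGetD g 0 []).length ≤ row.length)
    (r1 c1 r2 c2 : Int)
    (h0r : 0 ≤ r1) (hr12 : r1 + 2 ≤ r2) (hr2 : r2 < (g.length : Int))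
    (h0c : 0 ≤ c1) (hc12 : c1 + 2 ≤ c2) (hc2 : c2 < ((PySem.List.pyGetD g 0 []).length : Int)) :
    (((PySem.List.pyRange c1 (c2+1)).all fun c => pvGetA g r1 c == frame && pvGetA g r2 c == frame)
      && ((PySem.List.pyRange r1 (r2+1)).all fun r => pvGetA g r c1 == frame && pvGetA g r c2 == frame)
      && ((PySem.List.pyRange (r1+1) r2).all fun r =>
            (PySem.List.pyRange (c1+1) c2).all fun c => pvGetA g r c == 0))
    = (pvRect (colAccum (g.map fun row => prefixNe row frame ((PySem.List.pyGetD g 0 []).length : Int)) ((PySem.List.pyGetD g 0 []).length : Int)) r1 c1 r1 c2 == 0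
      && pvRect (colAccum (g.map fun row => prefixNe row frame ((PySem.List.pyGetD g 0 []).length : Int)) ((PySem.List.pyGetD g 0 []).length : Int)) r2 c1 r2 c2 == 0
      && pvRect (colAccum (g.map fun row => prefixNe row frame ((PySem.List.pyGetD g 0 []).length : Int)) ((PySem.List.pyGetD g 0 []).length : Int)) r1 c1 r2 c1 == 0
      && pvRect (colAccum (g.map fun row => prefixNe row frame ((PySem.List.pyGetD g 0 []).length : Int)) ((PySem.List.pyGetD g 0 []).length : Int)) r1 c2 r2 c2 == 0
      && pvRect (colAccum (g.map fun row => prefixNe row 0 ((PySem.List.pyGetD g 0 []).length : Int)) ((PySem.List.pyGetD g 0 []).length : Int)) (r1+1) (c1+1) (r2-1) (c2-1) == 0) := by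
  rw [Bool.eq_iff_iff]
  simp only [Bool.and_eq_true, List.all_eq_true, PySem.List.mem_pyRange_one, beq_iff_eq, and_imp]
  rw [rect_zero_iff g frame hPre r1 c1 r1 c2 (by omega) (by omega) (by omega) (by omega) (by omega) (by omega)]
  rw [rect_zero_iff g frame hPre r2 c1 r2 c2 (by omega) (by omega) (by omega) (by omega) (by omega) (by omega)]
  rw [rect_zero_iff g frame hPre r1 c1 r2 c1 (by omega) (by omega) (by omega) (by omega) (by omega) (by omega)]
  rw [rect_zero_iff g frame hPre r1 c2 r2 c2 (by omega) (by omega) (by omega) (by omega) (by omega) (by omega)]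
  rw [rect_zero_iff g 0 hPre (r1+1) (c1+1) (r2-1) (c2-1) (by omega) (by omega) (by omega) (by omega) (by omega) (by omega)]
  unfold pvGetA
  constructor
  · rintro ⟨⟨hTB, hLR⟩, hInt⟩
    refine ⟨⟨⟨⟨?_, ?_⟩, ?_⟩, ?_⟩, ?_⟩
    · intro r c hra hrb hca hcb
      have : r = r1 := by omega
      subst this
      exact (hTB c hca (by omega)).1
    · intro r c hra hrb hca hcb
      have : r = r2 := by omega
      subst this
      exact (hTB c hca (by omega)).2
    · intro r c hra hrb hca hcb
      have : c = c1 := by omega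
      subst this
      exact (hLR r hra (by omega)).1
    · intro r c hra hrb hca hcb
      have : c = c2 := by omega
      subst this
      exact (hLR r hra (by omega)).2
    · intro r c hra hrb hca hcb
      exact hInt r (by omega) (by omega) c (by omega) (by omega)
  · rintro ⟨⟨⟨⟨hT, hB⟩, hL⟩, hR⟩, hI⟩
    refine ⟨⟨?_, ?_⟩, ?_⟩
    · intro c hca hcb
      exact ⟨hT r1 c (by omega) (by omega) hca (by omega), hB r2 c (by omega) (by omega) hca (by omega)⟩
    · intro r hra hrb
      exact ⟨hL r c1 hra (by omega) (by omega) (by omega), hR r c2 hra (by omega) (by omega) (by omega)⟩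
    · intro r hra hrb c hca hcb
      exact hI r c (by omega) (by omega) (by omega) (by omega)

-- ===== VERDICT (by name: the statement is the Claim_ definition above) =====
theorem fill_rectangles_with_color_py_spec : Claim_equal_fill_rectangles_with_color_py := by
  intro g frame fill _hDom hPre
  obtain ⟨hne, hrows⟩ := hPre
  unfold Spec_fill_rectangles_with_color_py
  unfold fill_rectangles_with_color_py fill_rectangles_with_color_py_alt
  dsimp only
  apply PySem.List.foldl_congr_mem
  intro acc r1 hr1
  rw [PySem.List.mem_pyRange_one] at hr1
  apply PySem.List.foldl_congr_mem
  intro acc2 c1 hc1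
  rw [PySem.List.mem_pyRange_one] at hc1
  rw [pvGetB_eq]
  split
  · rfl
  apply PySem.List.foldl_congr_mem
  intro acc3 r2 hr2
  rw [PySem.List.mem_pyRange_one] at hr2
  apply PySem.List.foldl_congr_mem
  intro acc4 c2 hc2
  rw [PySem.List.mem_pyRange_one] at hc2
  rw [cond_eq g frame hrows r1 c1 r2 c2 (by omega) (by omega) (by omega) (by omega) (by omega) (by omega)]
  rw [pvFill_eq]
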